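-- pv_equiv track=rewrite | github.com/mugunthjhs/Duplicate-Question-Answer-Detection | source_code/pdf_preprocess/pdf_parsing_to_txt.py | merge_split_lines
-- ===== SOURCE A (Python) =====
-- def merge_split_lines(lines):
--     merged = []
--     i = 0
--     while i < len(lines):
--         line = lines[i].strip()
--         if (
--             line == "ANSWER THE FOLLOWING QUESTIONS WITH TWO OR THREE"
--             and i + 1 < len(lines)
--             and lines[i + 1].strip() == "SENTENCES"
--         ):
--             merged.append("ANSWER THE FOLLOWING QUESTIONS WITH TWO OR THREE SENTENCES")
--             i += 2
--         else:
--             merged.append(line)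
--             i += 1
--     return merged
-- ===== SOURCE B (Python) =====
-- ANS = "ANSWER THE FOLLOWING QUESTIONS WITH TWO OR THREE"
-- MERGED = "ANSWER THE FOLLOWING QUESTIONS WITH TWO OR THREE SENTENCES"
--
-- def merge_split_lines(lines):
--     # Pass 1: strip everything and mark, per position, whether a merge starts there.
--     stripped = [l.strip() for l in lines]
--     flags = [a == ANS and b == "SENTENCES" for a, b in zip(stripped, stripped[1:])] + [False]
--     prev = [False] + flags[:-1]
--     # Pass 2: zip-driven emission; starts can never be adjacent (ANS != "SENTENCES"),
--     # so "previous position was a start" is exactly "this line was consumed".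
--     out = []
--     for s, f, p in zip(stripped, flags, prev):
--         if f:
--             out.append(MERGED)
--         elif not p:
--             out.append(s)
--     return out
-- ===== Notes on version B (the rewrite author's own statement) =====
-- stated objective: alternative
-- what changed: Replaces A's stateful while-loop with lookahead and a variable step (i += 1 or 2) by a data-flow pipeline: strip all lines once, compute a merge-start flag list by zipping stripped with its own tail, shift it to get a consumed-by-previous list, and emit by a uniform zip over (stripped, flag, prev) with no index arithmetic.
import Mathlib
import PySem

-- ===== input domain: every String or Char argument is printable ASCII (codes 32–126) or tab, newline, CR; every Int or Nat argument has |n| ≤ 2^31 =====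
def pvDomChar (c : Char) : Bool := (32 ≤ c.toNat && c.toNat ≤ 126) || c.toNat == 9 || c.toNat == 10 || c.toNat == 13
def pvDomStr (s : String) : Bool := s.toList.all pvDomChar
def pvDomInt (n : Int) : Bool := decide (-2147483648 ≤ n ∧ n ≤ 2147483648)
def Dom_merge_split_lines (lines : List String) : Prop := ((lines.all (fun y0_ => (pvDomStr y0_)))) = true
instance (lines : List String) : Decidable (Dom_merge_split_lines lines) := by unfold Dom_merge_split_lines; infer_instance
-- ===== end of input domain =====

-- B differs from A only in structure (two zip-based passes instead of a while loop); same return value.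

def pvAns : String := "ANSWER THE FOLLOWING QUESTIONS WITH TWO OR THREE"
def pvMerged : String := "ANSWER THE FOLLOWING QUESTIONS WITH TWO OR THREE SENTENCES"

-- ===== PORT A =====
-- A's while loop advances i by 2 after a merge and by 1 otherwise: structurally,
-- recursion that drops two elements in the merge branch and one otherwise.
def mslGoA : List String → List String
  | [] => []
  | [x] => [PySem.Str.strip x]
  | x :: y :: rest =>
    if PySem.Str.strip x = pvAns ∧ PySem.Str.strip y = "SENTENCES" then
      pvMerged :: mslGoA rest
    else
      PySem.Str.strip x :: mslGoA (y :: rest)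

def merge_split_lines (lines : List String) : List String := mslGoA lines

-- ===== PORT B =====
-- flags: per position, does a merge start here (stripped[i] = ANS and stripped[i+1] = "SENTENCES")
def mslFlags (s : List String) : List Bool :=
  (List.zipWith (fun a b => decide (a = pvAns ∧ b = "SENTENCES")) s s.tail) ++ [false]

-- pass 2 over zip of (stripped, flag, prev-flag)
def mslGoB : List (String × Bool × Bool) → List String
  | [] => []
  | (_, true, _) :: t => pvMerged :: mslGoB t        -- if f: emit merged constant
  | (_, false, true) :: t => mslGoB t                 -- elif p: consumed by previous start
  | (s, false, false) :: t => s :: mslGoB t           -- else: emit stripped line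

def merge_split_lines_alt (lines : List String) : List String :=
  let stripped := lines.map PySem.Str.strip
  let flags := mslFlags stripped
  let prev := false :: flags.dropLast
  mslGoB (stripped.zip (flags.zip prev))

-- ===== PRECONDITION & SPEC =====
def Spec_merge_split_lines (lines : List String) (out : List String) : Prop := out = merge_split_lines_alt lines
instance (lines : List String) (out : List String) : Decidable (Spec_merge_split_lines lines out) := by unfold Spec_merge_split_lines; infer_instance

-- ===== CLAIM (what is proved, stated in full; the proofs are below) =====
def Claim_equal_merge_split_lines : Prop := ∀ (lines : List String), Dom_merge_split_lines lines → Spec_merge_split_lines lines (merge_split_lines lines)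

-- ===== LEMMAS AND PROOFS =====

theorem mslFlags_cons₂ (x y : String) (rest : List String) :
    mslFlags (x :: y :: rest) =
      decide (x = pvAns ∧ y = "SENTENCES") :: mslFlags (y :: rest) := by
  simp [mslFlags]

theorem mslFlags_ne_nil (s : List String) (h : s ≠ []) : mslFlags s ≠ [] := by
  cases s with
  | nil => exact absurd rfl h
  | cons a t => cases t <;> simp [mslFlags]

-- main invariant: B's pass 2 over stripped/flags/prev reproduces A's loop
theorem mslGoB_eq_goA (l : List String) :
    mslGoB ((l.map PySem.Str.strip).zip
      ((mslFlags (l.map PySem.Str.strip)).zip (false :: (mslFlags (l.map PySem.Str.strip)).dropLast)))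
    = mslGoA l := by
  induction l using mslGoA.induct with
  | case1 => simp [mslFlags, mslGoB, mslGoA]
  | case2 x => simp [mslFlags, mslGoB, mslGoA]
  | case3 x y rest hc ih =>
      have hflag : decide (PySem.Str.strip x = pvAns ∧ PySem.Str.strip y = "SENTENCES") = true := by
        simpa using hc
      have hne : mslFlags (PySem.Str.strip y :: List.map PySem.Str.strip rest) ≠ [] :=
        mslFlags_ne_nil _ (by simp)
      rw [List.map_cons, List.map_cons, mslFlags_cons₂, hflag,
        List.dropLast_cons_of_ne_nil hne, List.zip_cons_cons, List.zip_cons_cons, mslGoB,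
        mslGoA, if_pos hc]
      congr 1
      -- consume y (prev flag true) and land on the IH shape for rest
      cases rest with
      | nil => simp [mslFlags, mslGoB, mslGoA]
      | cons z rs =>
          have hsent : ("SENTENCES" : String) ≠ pvAns := by decide
          have hyflag : decide (PySem.Str.strip y = pvAns ∧ PySem.Str.strip z = "SENTENCES") = false := by
            rw [hc.2]; simp [hsent]
          have hne2 : mslFlags (PySem.Str.strip z :: List.map PySem.Str.strip rs) ≠ [] :=
            mslFlags_ne_nil _ (by simp)
          rw [List.map_cons, mslFlags_cons₂, hyflag, List.dropLast_cons_of_ne_nil hne2,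
            List.zip_cons_cons, List.zip_cons_cons, mslGoB]
          exact ih
  | case4 x y rest hc ih =>
      have hflag : decide (PySem.Str.strip x = pvAns ∧ PySem.Str.strip y = "SENTENCES") = false := by
        simpa using hc
      have hne : mslFlags (PySem.Str.strip y :: List.map PySem.Str.strip rest) ≠ [] :=
        mslFlags_ne_nil _ (by simp)
      rw [List.map_cons, List.map_cons, mslFlags_cons₂, hflag,
        List.dropLast_cons_of_ne_nil hne, List.zip_cons_cons, List.zip_cons_cons, mslGoB,
        mslGoA, if_neg hc]
      congr 1

-- ===== VERDICT (by name: the statement is the Claim_ definition above) =====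
theorem merge_split_lines_spec : Claim_equal_merge_split_lines := by
  intro lines _
  unfold Spec_merge_split_lines merge_split_lines merge_split_lines_alt
  exact (mslGoB_eq_goA lines).symm
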